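-- pv_equiv track=rewrite | github.com/noorearafin/Specwright | exporters.py | _parse_md_blocks
-- ===== SOURCE A (Python) =====
-- def _parse_md_blocks(md: str) -> list[tuple[str, str]]:
--     """Convert a markdown string into a list of (kind, text) block tuples.
--
--     A minimal, dependency-free parser — we only need to handle the structures
--     our test plan prompts produce (headings h1-h3, tables, bullet lists,
--     paragraphs). Does not handle code fences, blockquotes, or nested lists.
--
--     Returns a list of (kind, text) where kind is one of:
--       'h1', 'h2', 'h3' — heading levels
--       'table'          — full markdown table block (header + separator + rows)
--       'list'           — consecutive bullet lines joined with \n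
--       'p'              — paragraph (consecutive non-special lines joined with space)
--       'blank'          — empty line (used as a spacer by PDF/DOCX builders)
--     """
--     blocks = []
--     lines = md.splitlines()
--     i = 0
--     while i < len(lines):
--         line = lines[i]
--         stripped = line.rstrip()
--
--         if not stripped:
--             blocks.append(("blank", ""))
--             i += 1
--             continue
--
--         if stripped.startswith("# "):
--             blocks.append(("h1", stripped[2:].strip()))
--             i += 1
--         elif stripped.startswith("## "):
--             blocks.append(("h2", stripped[3:].strip()))
--             i += 1
--         elif stripped.startswith("### "):
--             blocks.append(("h3", stripped[4:].strip()))
--             i += 1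
--         elif "|" in stripped and i + 1 < len(lines) and "---" in lines[i + 1]:
--             # Markdown table: collect header + separator + all following pipe rows
--             tbl = [stripped]
--             i += 1  # advance to separator row
--             tbl.append(lines[i])
--             i += 1
--             while i < len(lines) and "|" in lines[i]:
--                 tbl.append(lines[i])
--                 i += 1
--             blocks.append(("table", "\n".join(tbl)))
--         elif stripped.startswith(("- ", "* ")):
--             # Bullet list: collect consecutive lines starting with - or *
--             items = [stripped]
--             i += 1
--             while i < len(lines) and lines[i].startswith(("- ", "* ")):
--                 items.append(lines[i])
--                 i += 1
--             blocks.append(("list", "\n".join(items)))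
--         else:
--             # Paragraph: gather consecutive non-blank, non-heading, non-list lines
--             para = [stripped]
--             i += 1
--             while i < len(lines) and lines[i].strip() and not lines[i].startswith(
--                 ("#", "- ", "* ", "|")
--             ):
--                 para.append(lines[i].strip())
--                 i += 1
--             blocks.append(("p", " ".join(para)))
--
--     return blocks
-- ===== SOURCE B (Python) =====
-- def _parse_md_blocks(md: str) -> list[tuple[str, str]]:
--     """Single-pass state machine over the lines: keep a current open-block
--     mode and buffer, flush when a line no longer belongs, then dispatch the
--     line fresh (with a one-line peek for tables)."""
--     blocks = []
--     lines = md.splitlines()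
--     mode = None          # None, 'tablesep', 'table', 'list', 'p'
--     buf = []
--
--     def flush():
--         nonlocal mode, buf
--         if mode == 'p':
--             blocks.append(('p', ' '.join(buf)))
--         elif mode == 'list':
--             blocks.append(('list', '\n'.join(buf)))
--         elif mode in ('table', 'tablesep'):
--             blocks.append(('table', '\n'.join(buf)))
--         mode, buf = None, []
--
--     for idx, line in enumerate(lines):
--         if mode == 'tablesep':            # separator row joins unconditionally
--             buf.append(line)
--             mode = 'table'
--             continue
--         if mode == 'table':
--             if '|' in line:
--                 buf.append(line)
--                 continue
--             flush()
--         elif mode == 'list':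
--             if line.startswith(('- ', '* ')):
--                 buf.append(line)
--                 continue
--             flush()
--         elif mode == 'p':
--             if line.strip() and not line.startswith(('#', '- ', '* ', '|')):
--                 buf.append(line.strip())
--                 continue
--             flush()
--
--         stripped = line.rstrip()
--         if not stripped:
--             blocks.append(('blank', ''))
--         elif stripped.startswith('# '):
--             blocks.append(('h1', stripped[2:].strip()))
--         elif stripped.startswith('## '):
--             blocks.append(('h2', stripped[3:].strip()))
--         elif stripped.startswith('### '):
--             blocks.append(('h3', stripped[4:].strip()))
--         elif '|' in stripped and idx + 1 < len(lines) and '---' in lines[idx + 1]: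
--             mode, buf = 'tablesep', [stripped]
--         elif stripped.startswith(('- ', '* ')):
--             mode, buf = 'list', [stripped]
--         else:
--             mode, buf = 'p', [stripped]
--
--     flush()
--     return blocks
-- ===== Notes on version B (the rewrite author's own statement) =====
-- stated objective: alternative
-- what changed: Replaced A's index-based while loop with three nested collection while-loops and a next-line index lookahead by a single for-loop state machine over the lines that keeps a current mode ('tablesep'/'table'/'list'/'p') and a line buffer, flushing the open block when a line no longer belongs and re-dispatching that line fresh.
import Mathlib
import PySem

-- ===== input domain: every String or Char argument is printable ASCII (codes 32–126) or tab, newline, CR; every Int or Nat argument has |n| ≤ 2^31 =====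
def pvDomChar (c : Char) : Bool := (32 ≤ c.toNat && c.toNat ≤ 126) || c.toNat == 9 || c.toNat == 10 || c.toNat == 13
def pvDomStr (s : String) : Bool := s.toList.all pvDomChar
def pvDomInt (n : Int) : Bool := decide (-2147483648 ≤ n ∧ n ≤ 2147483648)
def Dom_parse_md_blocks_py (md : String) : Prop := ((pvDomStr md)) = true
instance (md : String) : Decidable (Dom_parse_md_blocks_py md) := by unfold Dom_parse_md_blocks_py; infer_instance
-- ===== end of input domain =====

-- B re-implements A's index-while parser as a single-pass state machine (mode + buffer, flush on block end); same output, same cost ('alternative').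

-- ===== PORT A =====
-- shared line predicates (used verbatim by both Pythons)
def pvIsBullet (l : String) : Bool :=
  PySem.Str.startswith l "- " || PySem.Str.startswith l "* "

def pvParaCont (l : String) : Bool :=
  !(PySem.Str.strip l = "") &&
    !(PySem.Str.startswith l "#" || PySem.Str.startswith l "- " ||
      PySem.Str.startswith l "* " || PySem.Str.startswith l "|")

-- A's inner 'while' loops: collect continuation lines, return (collected, rest)
def pvA_table : List String → List String × List String
  | [] => ([], [])
  | l :: rest =>
    if PySem.Str.isIn "|" l then
      let res := pvA_table rest
      (l :: res.1, res.2)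
    else ([], l :: rest)

def pvA_list : List String → List String × List String
  | [] => ([], [])
  | l :: rest =>
    if pvIsBullet l then
      let res := pvA_list rest
      (l :: res.1, res.2)
    else ([], l :: rest)

def pvA_para : List String → List String × List String
  | [] => ([], [])
  | l :: rest =>
    if pvParaCont l then
      let res := pvA_para rest
      (PySem.Str.strip l :: res.1, res.2)
    else ([], l :: rest)

-- termination facts cited in pvA_go's termination proof
theorem pvA_table_len (ls : List String) : (pvA_table ls).2.length ≤ ls.length := by
  induction ls with
  | nil => simp [pvA_table]
  | cons l rest ih => simp only [pvA_table]; split <;> simp <;> omega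

theorem pvA_list_len (ls : List String) : (pvA_list ls).2.length ≤ ls.length := by
  induction ls with
  | nil => simp [pvA_list]
  | cons l rest ih => simp only [pvA_list]; split <;> simp <;> omega

theorem pvA_para_len (ls : List String) : (pvA_para ls).2.length ≤ ls.length := by
  induction ls with
  | nil => simp [pvA_para]
  | cons l rest ih => simp only [pvA_para]; split <;> simp <;> omega

-- A's outer 'while i < len(lines)' loop, as recursion on the remaining lines
def pvA_go (lines : List String) : List (String × String) :=
  match lines with
  | [] => []
  | line :: rest =>
    let stripped := PySem.Str.rstrip line
    if stripped = "" then ("blank", "") :: pvA_go rest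
    else if PySem.Str.startswith stripped "# " then
      ("h1", PySem.Str.strip (PySem.Str.slice stripped (some 2) none)) :: pvA_go rest
    else if PySem.Str.startswith stripped "## " then
      ("h2", PySem.Str.strip (PySem.Str.slice stripped (some 3) none)) :: pvA_go rest
    else if PySem.Str.startswith stripped "### " then
      ("h3", PySem.Str.strip (PySem.Str.slice stripped (some 4) none)) :: pvA_go rest
    else if PySem.Str.isIn "|" stripped && !rest.isEmpty && PySem.Str.isIn "---" (rest.headD "") then
      let res := pvA_table rest.tail
      ("table", PySem.Str.join "\n" (stripped :: rest.headD "" :: res.1)) :: pvA_go res.2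
    else if pvIsBullet stripped then
      let res := pvA_list rest
      ("list", PySem.Str.join "\n" (stripped :: res.1)) :: pvA_go res.2
    else
      let res := pvA_para rest
      ("p", PySem.Str.join " " (stripped :: res.1)) :: pvA_go res.2
termination_by lines.length
decreasing_by
  all_goals (
    have h1 := pvA_table_len rest.tail
    have h2 := pvA_list_len rest
    have h3 := pvA_para_len rest
    have h4 : rest.tail.length <= rest.length := by simp [List.length_tail]
    simp_all
    all_goals omega)

def parse_md_blocks_py (md : String) : List (String × String) :=
  pvA_go (PySem.Str.splitlines md)

-- ===== PORT B =====
-- B's state machine: the open-block mode ('tablesep' = separator row pending)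
inductive PvMode : Type
  | none | tablesep | table | list | p
deriving DecidableEq, Repr

-- B's flush(): emit the open block, if any
def pvFlush (mode : PvMode) (buf : List String) : List (String × String) :=
  match mode with
  | .p => [("p", PySem.Str.join " " buf)]
  | .list => [("list", PySem.Str.join "\n" buf)]
  | .table => [("table", PySem.Str.join "\n" buf)]
  | .tablesep => [("table", PySem.Str.join "\n" buf)]
  | .none => []

-- B's for-loop over the lines (peek at the next line = head of the rest)
def pvB_go (blocks : List (String × String)) (mode : PvMode) (buf : List String) :
    List String → List (String × String)
  | [] => blocks ++ pvFlush mode buf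
  | line :: rest =>
    match mode with
    | .tablesep => pvB_go blocks .table (buf ++ [line]) rest
    | .table =>
      if PySem.Str.isIn "|" line then pvB_go blocks .table (buf ++ [line]) rest
      else pvB_go (blocks ++ pvFlush .table buf) .none [] (line :: rest)
    | .list =>
      if pvIsBullet line then pvB_go blocks .list (buf ++ [line]) rest
      else pvB_go (blocks ++ pvFlush .list buf) .none [] (line :: rest)
    | .p =>
      if pvParaCont line then pvB_go blocks .p (buf ++ [PySem.Str.strip line]) rest
      else pvB_go (blocks ++ pvFlush .p buf) .none [] (line :: rest)
    | .none =>
      let stripped := PySem.Str.rstrip line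
      if stripped = "" then pvB_go (blocks ++ [("blank", "")]) .none [] rest
      else if PySem.Str.startswith stripped "# " then
        pvB_go (blocks ++ [("h1", PySem.Str.strip (PySem.Str.slice stripped (some 2) none))]) .none [] rest
      else if PySem.Str.startswith stripped "## " then
        pvB_go (blocks ++ [("h2", PySem.Str.strip (PySem.Str.slice stripped (some 3) none))]) .none [] rest
      else if PySem.Str.startswith stripped "### " then
        pvB_go (blocks ++ [("h3", PySem.Str.strip (PySem.Str.slice stripped (some 4) none))]) .none [] rest
      else if PySem.Str.isIn "|" stripped && !rest.isEmpty && PySem.Str.isIn "---" (rest.headD "") then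
        pvB_go blocks .tablesep [stripped] rest
      else if pvIsBullet stripped then pvB_go blocks .list [stripped] rest
      else pvB_go blocks .p [stripped] rest
termination_by lines => (lines.length, match mode with | .none => 0 | _ => 1)
decreasing_by all_goals simp_wf <;> omega

def parse_md_blocks_py_alt (md : String) : List (String × String) :=
  pvB_go [] .none [] (PySem.Str.splitlines md)

-- ===== PRECONDITION & SPEC =====
def Spec_parse_md_blocks_py (md : String) (out : List (String × String)) : Prop := out = parse_md_blocks_py_alt md
instance (md : String) (out : List (String × String)) : Decidable (Spec_parse_md_blocks_py md out) := by unfold Spec_parse_md_blocks_py; infer_instance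

-- ===== CLAIM (what is proved, stated in full; the proofs are below) =====
def Claim_equal_parse_md_blocks_py : Prop := ∀ (md : String), Dom_parse_md_blocks_py md → Spec_parse_md_blocks_py md (parse_md_blocks_py md)

-- ===== LEMMAS AND PROOFS =====
theorem pv_main (n : Nat) : ∀ lines : List String, lines.length ≤ n →
    (∀ acc, pvB_go acc .none [] lines = acc ++ pvA_go lines) ∧
    (∀ acc buf, pvB_go acc .table buf lines =
      acc ++ ("table", PySem.Str.join "\n" (buf ++ (pvA_table lines).1)) :: pvA_go (pvA_table lines).2) ∧
    (∀ acc buf, pvB_go acc .list buf lines =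
      acc ++ ("list", PySem.Str.join "\n" (buf ++ (pvA_list lines).1)) :: pvA_go (pvA_list lines).2) ∧
    (∀ acc buf, pvB_go acc .p buf lines =
      acc ++ ("p", PySem.Str.join " " (buf ++ (pvA_para lines).1)) :: pvA_go (pvA_para lines).2) := by
  induction n with
  | zero =>
    intro lines h
    have he : lines = [] := List.eq_nil_of_length_eq_zero (Nat.le_zero.mp h)
    subst he
    refine ⟨?_, ?_, ?_, ?_⟩ <;> intros <;> simp [pvB_go, pvFlush, pvA_go, pvA_table, pvA_list, pvA_para]
  | succ n ih =>
    have hL0 : ∀ lines : List String, lines.length ≤ n + 1 →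
        ∀ acc, pvB_go acc .none [] lines = acc ++ pvA_go lines := by
      intro lines hl acc
      match lines with
      | [] => simp [pvB_go, pvFlush, pvA_go]
      | line :: rest =>
        have hr : rest.length ≤ n := by simp at hl; omega
        conv_lhs => rw [pvB_go.eq_def]
        conv_rhs => rw [pvA_go.eq_def]
        simp only []
        split_ifs with h1 h2 h3 h4 h5 h6
        · rw [(ih rest hr).1]; simp
        · rw [(ih rest hr).1]; simp
        · rw [(ih rest hr).1]; simp
        · rw [(ih rest hr).1]; simp
        · -- table
          obtain ⟨sep, rest2, rfl⟩ : ∃ sep rest2, rest = sep :: rest2 := by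
            rcases rest with _ | ⟨sep, rest2⟩
            · simp at h5
            · exact ⟨_, _, rfl⟩
          have hr2 : rest2.length ≤ n := by simp at hr; omega
          conv_lhs => rw [pvB_go.eq_def]
          simp only []
          rw [(ih rest2 hr2).2.1]
          simp
        · rw [(ih rest hr).2.2.1]; simp
        · rw [(ih rest hr).2.2.2]; simp
    have hTab : ∀ lines : List String, lines.length ≤ n + 1 → ∀ acc buf,
        pvB_go acc .table buf lines =
          acc ++ ("table", PySem.Str.join "\n" (buf ++ (pvA_table lines).1)) :: pvA_go (pvA_table lines).2 := by
      intro lines hl acc buf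
      match lines with
      | [] => simp [pvB_go, pvFlush, pvA_table, pvA_go]
      | line :: rest =>
        have hr : rest.length ≤ n := by simp at hl; omega
        conv_lhs => rw [pvB_go.eq_def]
        simp only [pvA_table]
        split_ifs with h
        · rw [(ih rest hr).2.1]; simp
        · rw [hL0 (line :: rest) hl]; simp [pvFlush]
    have hList : ∀ lines : List String, lines.length ≤ n + 1 → ∀ acc buf,
        pvB_go acc .list buf lines =
          acc ++ ("list", PySem.Str.join "\n" (buf ++ (pvA_list lines).1)) :: pvA_go (pvA_list lines).2 := by
      intro lines hl acc buf
      match lines with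
      | [] => simp [pvB_go, pvFlush, pvA_list, pvA_go]
      | line :: rest =>
        have hr : rest.length ≤ n := by simp at hl; omega
        conv_lhs => rw [pvB_go.eq_def]
        simp only [pvA_list]
        split_ifs with h
        · rw [(ih rest hr).2.2.1]; simp
        · rw [hL0 (line :: rest) hl]; simp [pvFlush]
    have hP : ∀ lines : List String, lines.length ≤ n + 1 → ∀ acc buf,
        pvB_go acc .p buf lines =
          acc ++ ("p", PySem.Str.join " " (buf ++ (pvA_para lines).1)) :: pvA_go (pvA_para lines).2 := by
      intro lines hl acc buf
      match lines with
      | [] => simp [pvB_go, pvFlush, pvA_para, pvA_go]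
      | line :: rest =>
        have hr : rest.length ≤ n := by simp at hl; omega
        conv_lhs => rw [pvB_go.eq_def]
        simp only [pvA_para]
        split_ifs with h
        · rw [(ih rest hr).2.2.2]; simp
        · rw [hL0 (line :: rest) hl]; simp [pvFlush]
    exact fun lines hl => ⟨hL0 lines hl, hTab lines hl, hList lines hl, hP lines hl⟩

-- ===== VERDICT (by name: the statement is the Claim_ definition above) =====
theorem parse_md_blocks_py_spec : Claim_equal_parse_md_blocks_py := by
  intro md _
  unfold Spec_parse_md_blocks_py parse_md_blocks_py parse_md_blocks_py_alt
  exact ((pv_main (PySem.Str.splitlines md).length (PySem.Str.splitlines md) le_rfl).1 []).symm
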